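-- pv_equiv track=rewrite | github.com/Sedce/CMSC-142-MP | Algorithms.py | get_Unsortedness
-- ===== SOURCE A (Python) =====
-- def get_Unsortedness(data):
--     counter = 0;
--     comparisons = 0;
--     i = 0
--     for index in range(1, len(data)):
--         counter+=1
--         comparisons += 1
--         #print (index)
--         while 0 < index and data[index] < data[index - 1]:
--             counter += 1
--             index -= 1
--             #comparisons += 1
--
--     comparisons += 1
--     return comparisons, counter
-- ===== SOURCE B (Python) =====
-- def get_Unsortedness(data):
--     n = len(data)
--     counter = n - 1 if n else 0
--     streak = 0
--     for i in range(1, n):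
--         streak = streak + 1 if data[i] < data[i - 1] else 0
--         counter += streak
--     return max(n, 1), counter
-- ===== Notes on version B (the rewrite author's own statement) =====
-- stated objective: faster
-- what changed: Replaces A's per-index backward-walking while loop (O(n^2)) by a one-pass streak recurrence (streak = streak+1 if data[i]<data[i-1] else 0) summed with n-1, and a closed form max(n,1) for the comparison count.
import Mathlib
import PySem

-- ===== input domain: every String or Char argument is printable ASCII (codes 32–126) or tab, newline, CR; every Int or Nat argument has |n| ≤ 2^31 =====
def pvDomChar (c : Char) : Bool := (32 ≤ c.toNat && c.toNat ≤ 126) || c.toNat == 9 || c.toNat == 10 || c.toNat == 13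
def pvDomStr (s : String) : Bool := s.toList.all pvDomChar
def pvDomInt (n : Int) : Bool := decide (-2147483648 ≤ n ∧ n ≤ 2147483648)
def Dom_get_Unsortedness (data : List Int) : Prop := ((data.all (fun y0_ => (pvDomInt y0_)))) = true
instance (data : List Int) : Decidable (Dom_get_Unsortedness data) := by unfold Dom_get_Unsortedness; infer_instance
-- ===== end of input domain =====

-- B replaces A's O(n^2) backward-walking while loop by an O(n) streak recurrence; return value equivalence proved.

-- ===== PORT A =====
-- the 'while 0 < index and data[index] < data[index-1]' loop, recursing on index
-- (indices are nonnegative and in range here, so List.getD is exact for data[index])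
def pvWhileA (data : List Int) (counter : Int) : Nat → Int
  | 0 => counter
  | i + 1 =>
    if data.getD (i + 1) 0 < data.getD i 0 then pvWhileA data (counter + 1) i
    else counter

def get_Unsortedness (data : List Int) : Int × Int :=
  -- state = (counter, comparisons), i = 0 is unused in A
  let st := (PySem.List.pyRange 1 (data.length : Int) 1).foldl
    (fun (s : Int × Int) idx => (pvWhileA data (s.1 + 1) idx.toNat, s.2 + 1)) (0, 0)
  (st.2 + 1, st.1)

-- ===== PORT B =====
def pvStepB (data : List Int) (s : Int × Int) (i : Int) : Int × Int :=
  let streak := if data.getD i.toNat 0 < data.getD (i.toNat - 1) 0 then s.1 + 1 else 0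
  (streak, s.2 + streak)

def get_Unsortedness_alt (data : List Int) : Int × Int :=
  let n : Int := data.length
  let counter0 : Int := if n = 0 then 0 else n - 1
  let sc := (PySem.List.pyRange 1 n 1).foldl (pvStepB data) (0, counter0)
  (max n 1, sc.2)

-- ===== PRECONDITION & SPEC =====
def Spec_get_Unsortedness (data : List Int) (out : Int × Int) : Prop := out = get_Unsortedness_alt data
instance (data : List Int) (out : Int × Int) : Decidable (Spec_get_Unsortedness data out) := by unfold Spec_get_Unsortedness; infer_instance

-- ===== CLAIM (what is proved, stated in full; the proofs are below) =====
def Claim_equal_get_Unsortedness : Prop := ∀ (data : List Int), Dom_get_Unsortedness data → Spec_get_Unsortedness data (get_Unsortedness data)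

-- ===== LEMMAS AND PROOFS =====

-- the streak value at position i (length of the decreasing run ending at i)
def pvStrk (data : List Int) : Nat → Int
  | 0 => 0
  | i + 1 => if data.getD (i + 1) 0 < data.getD i 0 then pvStrk data i + 1 else 0

theorem pvWhileA_eq (data : List Int) : ∀ (i : Nat) (c : Int),
    pvWhileA data c i = c + pvStrk data i := by
  intro i
  induction i with
  | zero => intro c; simp [pvWhileA, pvStrk]
  | succ i ih =>
    intro c
    simp only [pvWhileA, pvStrk]
    split
    · rw [ih]; ring
    · ring

def pvStepA (data : List Int) (s : Int × Int) (idx : Int) : Int × Int :=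
  (pvWhileA data (s.1 + 1) idx.toNat, s.2 + 1)

-- the second component of B's fold is a pure accumulator: shifting the start shifts the result
theorem pvFoldB_shift (data : List Int) : ∀ (l : List Int) (a b c : Int),
    l.foldl (pvStepB data) (a, b + c)
      = ((l.foldl (pvStepB data) (a, b)).1, (l.foldl (pvStepB data) (a, b)).2 + c) := by
  intro l
  induction l with
  | nil => intro a b c; simp
  | cons i l ih =>
    intro a b c
    simp only [List.foldl_cons, pvStepB]
    have h : b + c + (if data.getD i.toNat 0 < data.getD (i.toNat - 1) 0 then a + 1 else 0)
        = (b + (if data.getD i.toNat 0 < data.getD (i.toNat - 1) 0 then a + 1 else 0)) + c := by ring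
    rw [h, ih]

theorem pvKey (data : List Int) : ∀ (m : Nat),
    ((PySem.List.pyRange 1 ((m : Int) + 1) 1).foldl (pvStepA data) (0, 0)).1
        = (m : Int) + ((PySem.List.pyRange 1 ((m : Int) + 1) 1).foldl (pvStepB data) (0, 0)).2
    ∧ ((PySem.List.pyRange 1 ((m : Int) + 1) 1).foldl (pvStepA data) (0, 0)).2 = (m : Int)
    ∧ ((PySem.List.pyRange 1 ((m : Int) + 1) 1).foldl (pvStepB data) (0, 0)).1 = pvStrk data m := by
  intro m
  induction m with
  | zero =>
    rw [PySem.List.pyRange_one_eq_nil (by norm_num)]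
    simp [pvStrk]
  | succ m ih =>
    obtain ⟨ih1, ih2, ih3⟩ := ih
    have hsplit : PySem.List.pyRange 1 ((↑(m + 1) : Int) + 1) 1
        = PySem.List.pyRange 1 ((m : Int) + 1) 1 ++ [((m : Int) + 1)] := by
      have := PySem.List.pyRange_one_succ_right (a := 1) (b := (m : Int) + 1)
        (by push_cast; omega)
      push_cast
      push_cast at this
      exact this
    rw [hsplit]
    simp only [List.foldl_append, List.foldl_cons, List.foldl_nil]
    have htn : ((m : Int) + 1).toNat = m + 1 := by omega
    have htn1 : ((m : Int) + 1).toNat - 1 = m := by omega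
    constructor
    · simp only [pvStepA, pvStepB, htn, pvWhileA_eq, ih1, ih2, ih3, pvStrk]
      push_cast
      split <;> ring
    constructor
    · simp only [pvStepA, ih2]; push_cast; ring
    · simp only [pvStepB, htn, ih3, pvStrk, Nat.add_sub_cancel]

theorem get_Unsortedness_spec : Claim_equal_get_Unsortedness := by
  intro data _
  unfold Spec_get_Unsortedness get_Unsortedness get_Unsortedness_alt
  cases hn : data.length with
  | zero =>
    rw [PySem.List.pyRange_one_eq_nil (a := 1) (b := ((0 : Nat) : Int)) (by norm_num)]
    simp
  | succ m =>
    obtain ⟨h1, h2, h3⟩ := pvKey data m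
    have hc : ((m + 1 : Nat) : Int) = (m : Int) + 1 := by push_cast; ring
    simp only [hc]
    have hz : ((m : Int) + 1 ≠ 0) := by omega
    simp only [if_neg hz]
    have hshift := pvFoldB_shift data (PySem.List.pyRange 1 ((m : Int) + 1) 1) 0 0 ((m : Int) + 1 - 1)
    have hzz : (0 : Int) + ((m : Int) + 1 - 1) = (m : Int) + 1 - 1 := by ring
    rw [hzz] at hshift
    rw [hshift]
    have hmax : max ((m : Int) + 1) 1 = (m : Int) + 1 := by omega
    rw [hmax]
    refine Prod.ext ?_ ?_
    · show (_ : Int × Int).2 + 1 = (m : Int) + 1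
      change ((PySem.List.pyRange 1 ((m : Int) + 1) 1).foldl (pvStepA data) (0, 0)).2 + 1 = _
      rw [h2]
    · show (_ : Int × Int).1 = _
      change ((PySem.List.pyRange 1 ((m : Int) + 1) 1).foldl (pvStepA data) (0, 0)).1 = _
      rw [h1]; ring
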